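-- pv_equiv track=rewrite | github.com/poojithamiryala/Mission-Rnd-Python | mocktest2_problem3.py | next_no
-- ===== SOURCE A (Python) =====
-- def next_no(n,k):
--     list_n=list(str(k))
--     sum=n-1
--     index=0
--     for i in range(len(list_n)-1,0,-1):
--         if(list_n[i]!='9'):
--             index=i
--             break
--     y=int(''.join(list_n[:index+1]))
--     y=y+9
--     list_n[:index+1]=list(str(y))
--     return ''.join(list_n)
-- ===== SOURCE B (Python) =====
-- def next_no(n, k):
--     # Recursive right-peel: strip trailing '9's one at a time (keeping at least
--     # one leading character), then add 9 to what is left; no index search, no splice.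
--     def go(s):
--         if len(s) > 1 and s[-1] == '9':
--             return go(s[:-1]) + '9'
--         return str(int(s) + 9)
--     return go(str(k))
-- ===== Notes on version B (the rewrite author's own statement) =====
-- stated objective: simpler
-- what changed: Replaces A's right-to-left index-search loop over list(str(k)) with join/splice (and its dead 'sum = n - 1') by a short recursion that peels trailing '9' characters one at a time and builds the result back-to-front, adding 9 to the remaining prefix in the base case; no index arithmetic, no list splice.
import Mathlib
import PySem

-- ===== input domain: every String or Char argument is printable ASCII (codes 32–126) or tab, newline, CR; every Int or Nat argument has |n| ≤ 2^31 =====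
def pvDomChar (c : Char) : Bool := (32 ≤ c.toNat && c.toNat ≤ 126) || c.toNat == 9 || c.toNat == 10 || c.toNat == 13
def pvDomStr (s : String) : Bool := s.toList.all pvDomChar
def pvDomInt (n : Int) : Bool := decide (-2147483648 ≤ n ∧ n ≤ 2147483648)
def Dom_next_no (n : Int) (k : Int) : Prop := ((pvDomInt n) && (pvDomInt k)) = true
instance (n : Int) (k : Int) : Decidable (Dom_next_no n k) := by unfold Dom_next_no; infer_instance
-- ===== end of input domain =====

-- B replaces A's index-search loop + splice by a recursion that peels trailing
-- '9's and rebuilds the string back-to-front; objective: simpler.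

-- ===== PORT A =====
-- the for-loop with break: first i (scanning the given descending range) with list_n[i] != '9', else 0
def nextNoFind (l : List Char) : List Int → Int
  | [] => 0
  | i :: rest => if PySem.List.pyGetD l i ' ' ≠ '9' then i else nextNoFind l rest

def next_no (n : Int) (k : Int) : String :=
  let list_n := PySem.Int.toChars k          -- list(str(k))
  let _sum := n - 1                          -- dead in A, kept for fidelity
  let index := nextNoFind list_n (PySem.List.pyRange ((list_n.length : Int) - 1) 0 (-1))
  -- int(''.join(list_n[:index+1])): ValueError (ofChars? = none) excluded by Pre_
  let y := (PySem.Int.ofChars? (PySem.List.slice list_n none (some (index + 1)))).getD 0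
  let y := y + 9
  String.ofList (PySem.Int.toChars y ++ PySem.List.slice list_n (some (index + 1)) none)

-- ===== PORT B =====
-- go(s): peel a trailing '9' while len(s) > 1 and recurse, else str(int(s) + 9).
-- s[:-1] is dropLast (PySem.List.slice_to_neg_one); s[-1] is pyGetD s (-1);
-- int(s) raising ValueError (ofChars? = none) is excluded by Pre_.
def nextNoGo (s : List Char) : List Char :=
  if h : 1 < s.length ∧ PySem.List.pyGetD s (-1) ' ' = '9' then
    nextNoGo s.dropLast ++ ['9']
  else
    PySem.Int.toChars ((PySem.Int.ofChars? s).getD 0 + 9)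
termination_by s.length
decreasing_by simp [List.length_dropLast]; omega

def next_no_alt (n : Int) (k : Int) : String :=
  String.ofList (nextNoGo (PySem.Int.toChars k))

-- ===== PRECONDITION & SPEC =====
-- Pre_ excludes exactly the inputs where A raises ValueError: k in {-9, -99, -999, ...}
-- (str(k) is '-' followed only by '9's, so int() is applied to the bare sign '-'); B raises there too.
def Pre_next_no (n : Int) (k : Int) : Prop :=
  0 ≤ k ∨ ((PySem.Int.toChars k).drop 1).any (· ≠ '9') = true
instance (n : Int) (k : Int) : Decidable (Pre_next_no n k) := by unfold Pre_next_no; infer_instance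

def pvWitness_next_no : Int × Int := (5, 129)

def Spec_next_no (n : Int) (k : Int) (out : String) : Prop := out = next_no_alt n k
instance (n : Int) (k : Int) (out : String) : Decidable (Spec_next_no n k out) := by unfold Spec_next_no; infer_instance

-- ===== CLAIM (what is proved, stated in full; the proofs are below) =====
def Claim_equal_next_no : Prop := ∀ (n : Int) (k : Int), Dom_next_no n k → Pre_next_no n k → Spec_next_no n k (next_no n k)

-- ===== LEMMAS AND PROOFS =====

-- capped trailing-'9' run length: how many '9's B's recursion peels off s
def peel9 (s : List Char) : Nat :=
  min (s.reverse.takeWhile (· == '9')).length (s.length - 1)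

-- indices strictly inside l are unaffected by appending a character
theorem nextNoFind_append (l : List Char) (c : Char) (idxs : List Int)
    (h : ∀ i ∈ idxs, 0 ≤ i ∧ i < (l.length : Int)) :
    nextNoFind (l ++ [c]) idxs = nextNoFind l idxs := by
  induction idxs with
  | nil => rfl
  | cons i rest ih =>
    have hi := h i (by simp)
    have hget : PySem.List.pyGetD (l ++ [c]) i ' ' = PySem.List.pyGetD l i ' ' := by
      rw [PySem.List.pyGetD_eq_getElem _ _ hi.1 (by simp; omega),
          PySem.List.pyGetD_eq_getElem _ _ hi.1 (by omega)]
      exact List.getElem_append_left (by omega)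
    simp only [nextNoFind, hget]
    split
    · rfl
    · exact ih (fun j hj => h j (by simp [hj]))

-- A's loop result equals the trailing-'9'-run formula
theorem nextNoFind_eq (l : List Char) :
    nextNoFind l (PySem.List.pyRange ((l.length : Int) - 1) 0 (-1)) =
      max ((l.length : Int) - 1 - ((l.reverse.takeWhile (· == '9')).length : Int)) 0 := by
  induction l using List.reverseRecOn with
  | nil =>
    rw [PySem.List.pyRange_neg_one_eq_nil (by simp)]
    simp [nextNoFind]
  | append_singleton l c ih =>
    have hm1 : (((l ++ [c]).length : Int) - 1) = (l.length : Int) := by simp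
    rw [hm1]
    by_cases hm : l.length = 0
    · rw [PySem.List.pyRange_neg_one_eq_nil (by omega)]
      have : ((l ++ [c]).reverse.takeWhile (· == '9')).length ≤ (l ++ [c]).length := by
        have h1 := (List.takeWhile_sublist (l := (l ++ [c]).reverse) (p := (· == '9'))).length_le
        simpa using h1
      simp only [nextNoFind]
      have hlc : ((l ++ [c]).length : Int) = (l.length : Int) + 1 := by simp
      omega
    · rw [PySem.List.pyRange_neg_one_cons (by omega)]
      have hget : PySem.List.pyGetD (l ++ [c]) ((l.length : Int)) ' ' = c := by
        rw [PySem.List.pyGetD_eq_getElem _ _ (by omega) (by simp)]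
        simp
      simp only [nextNoFind, hget]
      have hrev : (l ++ [c]).reverse = c :: l.reverse := by simp
      by_cases hc : c = '9'
      · subst hc
        simp only [ne_eq, not_true_eq_false, if_false, hrev]
        rw [nextNoFind_append l '9' _ (by
          intro i hi
          rw [PySem.List.mem_pyRange_neg_one] at hi
          omega)]
        rw [List.takeWhile_cons_of_pos (by simp)]
        have hlc : ((l ++ ['9']).length : Int) = (l.length : Int) + 1 := by simp
        rw [hlc] at *
        simp only [List.length_cons]
        rw [ih]
        push_cast
        omega
      · rw [if_pos hc, hrev, List.takeWhile_cons_of_neg (by simp [hc])]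
        simp only [List.length_nil]
        omega

-- trailing-run length is bounded by the list length
theorem trailing_le (s : List Char) :
    (s.reverse.takeWhile (· == '9')).length ≤ s.length := by
  have h1 := (List.takeWhile_sublist (l := s.reverse) (p := (· == '9'))).length_le
  simpa using h1

-- the last peel9 s characters of s are all '9'
theorem drop_peel9 (s : List Char) (m : Nat)
    (hm : m ≤ (s.reverse.takeWhile (· == '9')).length) :
    s.drop (s.length - m) = List.replicate m '9' := by
  have hms : m ≤ s.length := by
    have := (List.takeWhile_sublist (l := s.reverse) (p := (· == '9'))).length_le
    simp at this; omega
  have hd : s.drop (s.length - m) = (s.reverse.take m).reverse := by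
    rw [List.take_reverse, List.reverse_reverse]
  have hpre := List.prefix_iff_eq_take.mp (List.takeWhile_prefix (l := s.reverse) (· == '9'))
  have htw : s.reverse.take m = (s.reverse.takeWhile (· == '9')).take m := by
    conv_rhs => rw [hpre]
    rw [List.take_take, min_eq_left hm]
  rw [hd, htw]
  apply List.eq_replicate_iff.mpr
  constructor
  · simp [min_eq_left hm]
  · intro b hb
    have hb' : b ∈ s.reverse.takeWhile (· == '9') := by
      simp at hb
      exact List.mem_of_mem_take hb
    have := List.mem_takeWhile_imp hb'
    simpa using this

-- peeling grows by one under a '9' appended to a nonempty list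
theorem peel9_append_nine (l : List Char) (hl : l ≠ []) :
    peel9 (l ++ ['9']) = peel9 l + 1 := by
  unfold peel9
  have h1 : (l ++ ['9']).reverse = '9' :: l.reverse := by simp
  rw [h1, List.takeWhile_cons_of_pos (by simp)]
  have := trailing_le l
  have hl' : 1 ≤ l.length := List.length_pos_iff.mpr hl
  simp only [List.length_cons, List.length_append, List.length_nil]
  omega

-- a list ending in a non-'9' (or a single character) peels nothing
theorem peel9_base (l : List Char) (c : Char) (h : l = [] ∨ c ≠ '9') :
    peel9 (l ++ [c]) = 0 := by
  unfold peel9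
  rcases h with h | h
  · subst h; simp
  · rw [show (l ++ [c]).reverse = c :: l.reverse by simp,
        List.takeWhile_cons_of_neg (by simp [h])]
    simp

-- B's recursion computed in closed form: prefix plus the peeled nines
theorem nextNoGo_eq (s : List Char) (hs : s ≠ []) :
    nextNoGo s =
      PySem.Int.toChars ((PySem.Int.ofChars? (s.take (s.length - peel9 s))).getD 0 + 9)
        ++ List.replicate (peel9 s) '9' := by
  induction s using List.reverseRecOn with
  | nil => exact absurd rfl hs
  | append_singleton l c ih =>
    by_cases hbase : l = [] ∨ c ≠ '9'
    · rw [peel9_base l c hbase]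
      rw [nextNoGo]
      rw [dif_neg (by
        rcases hbase with h | h
        · subst h; simp
        · rw [PySem.List.pyGetD_neg_one_append_singleton]
          simp [h])]
      rw [Nat.sub_zero, List.take_length]
      simp
    · push Not at hbase
      obtain ⟨hl, hc⟩ := hbase
      subst hc
      rw [nextNoGo]
      rw [dif_pos (by
        constructor
        · have : 1 ≤ l.length := List.length_pos_iff.mpr hl
          simp; omega
        · exact PySem.List.pyGetD_neg_one_append_singleton l '9' ' ')]
      rw [List.dropLast_concat, ih hl, peel9_append_nine l hl]
      have htake : (l ++ ['9']).take ((l ++ ['9']).length - (peel9 l + 1))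
          = l.take (l.length - peel9 l) := by
        have h1 : (l ++ ['9']).length - (peel9 l + 1) = l.length - peel9 l := by
          simp
        rw [h1, List.take_append_of_le_length (by omega)]
      rw [htake, List.replicate_succ' (n := peel9 l)]
      simp [List.append_assoc]

-- Nat.toDigitsCore never shrinks its accumulator
theorem toDigitsCore_len (b f n : Nat) (acc : List Char) :
    acc.length ≤ (Nat.toDigitsCore b f n acc).length := by
  induction f generalizing n acc with
  | zero => simp [Nat.toDigitsCore]
  | succ f ih =>
    simp only [Nat.toDigitsCore]
    split
    · simp
    · calc acc.length ≤ (Nat.digitChar (n % b) :: acc).length := by simp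
        _ ≤ _ := ih _ _

-- str(k) is never the empty string
theorem toChars_ne_nil (k : Int) : PySem.Int.toChars k ≠ [] := by
  have hne : ∀ m : Nat, Nat.toDigits 10 m ≠ [] := by
    intro m
    unfold Nat.toDigits
    simp only [Nat.toDigitsCore]
    split
    · simp
    · intro h
      have := toDigitsCore_len 10 m (m / 10) [Nat.digitChar (m % 10)]
      rw [h] at this
      simp at this
  unfold PySem.Int.toChars
  split
  · simp
  · exact hne _

-- ===== VERDICT (by name: the statement is the Claim_ definition above) =====
theorem next_no_spec : Claim_equal_next_no := by
  intro n k _ _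
  unfold Spec_next_no
  simp only [next_no, next_no_alt]
  have hs : PySem.Int.toChars k ≠ [] := toChars_ne_nil k
  set s := PySem.Int.toChars k with hsdef
  have hL : 1 ≤ s.length := List.length_pos_iff.mpr hs
  have ht := trailing_le s
  have hp1 : peel9 s ≤ (s.reverse.takeWhile (· == '9')).length := min_le_left _ _
  rw [nextNoFind_eq]
  have hidx : max ((s.length : Int) - 1 - ((s.reverse.takeWhile (· == '9')).length : Int)) 0 + 1
      = ((s.length - peel9 s : Nat) : Int) := by
    unfold peel9
    omega
  rw [hidx, PySem.List.slice_to_natCast, PySem.List.slice_from_natCast,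
      nextNoGo_eq s hs, drop_peel9 s (peel9 s) hp1]
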